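-- pv_equiv track=rewrite | github.com/kjet-balaqian/challenges | letter_comb_phone_number2.py | letterCombinationsII
-- ===== SOURCE A (Python) =====
-- REVERSE_KEYBOARD = {
--     "a": "2", "b": "2", "c": "2",
--     "d": "3", "e": "3", "f": "3",
--     "g": "4", "h": "4", "i": "4",
--     "j": "5", "k": "5", "l": "5",
--     "m": "6", "n": "6", "o": "6",
--     "p": "7", "q": "7", "r": "7", "s": "7",
--     "t": "8", "u": "8", "v": "8",
--     "w": "9", "x": "9", "y": "9", "z": "9",
-- }
--
-- class TrieNode:
--
--     def __init__(self):
--         self.word_count = 0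
--         self.children = {}
--
--     def add(self, word):
--         node = self
--         for char in word:
--             if char not in node.children:
--                 node.children[char] = TrieNode()
--             node = node.children[char]
--             node.word_count += 1
--
-- def letterCombinationsII(queries, dict):
--     root = TrieNode()
--     for word in dict:
--         digit_word = ''.join([
--             REVERSE_KEYBOARD[c]
--             for c in word
--         ])
--         root.add(digit_word)
--
--     results = []
--     for query in queries:
--         node = root
--         for char in query:
--             if char not in node.children:
--                 node = None
--                 break
--             node = node.children[char]
--         results.append(node.word_count if node else 0)
--
--     return results
-- ===== SOURCE B (Python) =====
-- REVERSE_KEYBOARD = {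
--     "a": "2", "b": "2", "c": "2",
--     "d": "3", "e": "3", "f": "3",
--     "g": "4", "h": "4", "i": "4",
--     "j": "5", "k": "5", "l": "5",
--     "m": "6", "n": "6", "o": "6",
--     "p": "7", "q": "7", "r": "7", "s": "7",
--     "t": "8", "u": "8", "v": "8",
--     "w": "9", "x": "9", "y": "9", "z": "9",
-- }
--
-- def letterCombinationsII(queries, dict):
--     # Flat counter of every non-empty digit-prefix instead of a trie.
--     counts = {}
--     for word in dict:
--         digits = ''.join(REVERSE_KEYBOARD[c] for c in word)
--         prefix = ""
--         for d in digits: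
--             prefix += d
--             counts[prefix] = counts.get(prefix, 0) + 1
--     return [counts.get(query, 0) for query in queries]
-- ===== Notes on version B (the rewrite author's own statement) =====
-- stated objective: simpler
-- what changed: Replaces the TrieNode class and its pointer-walking trie with a flat dict that counts every non-empty digit-prefix of each dictionary word once while converting it, so each query is answered by a single dict lookup (empty queries naturally count 0, matching the root's untouched word_count).
import Mathlib
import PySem

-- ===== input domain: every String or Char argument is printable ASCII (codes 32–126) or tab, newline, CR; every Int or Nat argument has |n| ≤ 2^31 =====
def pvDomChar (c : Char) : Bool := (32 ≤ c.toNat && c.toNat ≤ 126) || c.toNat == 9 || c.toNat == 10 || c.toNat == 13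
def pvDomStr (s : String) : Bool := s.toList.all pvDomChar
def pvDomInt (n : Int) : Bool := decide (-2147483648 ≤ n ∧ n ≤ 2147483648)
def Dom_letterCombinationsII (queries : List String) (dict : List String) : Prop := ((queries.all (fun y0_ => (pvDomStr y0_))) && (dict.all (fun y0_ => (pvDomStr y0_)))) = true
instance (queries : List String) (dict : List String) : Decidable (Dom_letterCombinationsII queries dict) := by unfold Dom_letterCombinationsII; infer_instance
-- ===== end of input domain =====

-- B replaces A's TrieNode trie with a flat counter dict of all non-empty digit prefixes (simpler;
-- return-value equivalence only — neither version mutates its arguments).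

-- ===== PORT A =====
-- REVERSE_KEYBOARD: the module-level dict. REVERSE_KEYBOARD[c] raises KeyError for a char outside
-- the table; those inputs are excluded by Pre_, and the port uses the (never reached) default "".
def REVERSE_KEYBOARD : PySem.Dict Char String := PySem.Dict.ofList
  [('a', "2"), ('b', "2"), ('c', "2"),
   ('d', "3"), ('e', "3"), ('f', "3"),
   ('g', "4"), ('h', "4"), ('i', "4"),
   ('j', "5"), ('k', "5"), ('l', "5"),
   ('m', "6"), ('n', "6"), ('o', "6"),
   ('p', "7"), ('q', "7"), ('r', "7"), ('s', "7"),
   ('t', "8"), ('u', "8"), ('v', "8"),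
   ('w', "9"), ('x', "9"), ('y', "9"), ('z', "9")]

-- ''.join([REVERSE_KEYBOARD[c] for c in word]) — the digit word, kept as its list of characters
def digitWordOf (word : String) : List Char :=
  word.toList.flatMap (fun c => (REVERSE_KEYBOARD.getD c "").toList)

-- TrieNode: word_count plus a children dict Char → TrieNode (mutual pair instead of a nested inductive)
mutual
inductive Trie : Type
  | mk : Int → Children → Trie
inductive Children : Type
  | nil : Children
  | cons : Char → Trie → Children → Children
end

-- children dict lookup: char in node.children / node.children[char]
def Children.find : Children → Char → Option Trie
  | .nil, _ => none
  | .cons d t rest, c => if c = d then some t else rest.find c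

-- children dict assignment node.children[char] = … (overwrite in place, new keys append)
def Children.set : Children → Char → Trie → Children
  | .nil, c, t => .cons c t .nil
  | .cons d t0 rest, c, t => if c = d then .cons d t rest else .cons d t0 (rest.set c t)

def Trie.count : Trie → Int
  | .mk n _ => n

-- node.word_count += 1
def Trie.bump : Trie → Trie
  | .mk n ch => .mk (n + 1) ch

-- TrieNode.add: walk the word, creating missing children, incrementing each visited child's count
def Trie.add : Trie → List Char → Trie
  | t, [] => t
  | .mk n ch, c :: rest =>
      let child := (ch.find c).getD (.mk 0 .nil)
      .mk n (ch.set c (Trie.add child.bump rest))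

-- the query loop: node = node.children[char] until a miss (None)
def Trie.lookup : Trie → List Char → Option Trie
  | t, [] => some t
  | .mk _ ch, c :: rest =>
      match ch.find c with
      | none => none
      | some t' => t'.lookup rest

def letterCombinationsII (queries : List String) (dict : List String) : List Int :=
  let root := dict.foldl (fun r word => r.add (digitWordOf word)) (Trie.mk 0 Children.nil)
  queries.map (fun query =>
    match root.lookup query.toList with
    | some node => node.count
    | none => 0)

-- ===== PORT B =====
-- the inner loop over one digit word: extend the running prefix one digit at a time, counting each prefix
def bInner (w : List Char) (s : List Char × PySem.Dict (List Char) Int) :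
    List Char × PySem.Dict (List Char) Int :=
  w.foldl
    (fun s d =>
      let pref := s.1 ++ [d]
      (pref, s.2.insert pref (s.2.getD pref 0 + 1)))
    s

-- one dict word: prefix = ""; counts updated along its digit word
def bWordStep (counts : PySem.Dict (List Char) Int) (word : String) : PySem.Dict (List Char) Int :=
  (bInner (digitWordOf word) ([], counts)).2

def letterCombinationsII_alt (queries : List String) (dict : List String) : List Int :=
  let counts := dict.foldl bWordStep PySem.Dict.empty
  queries.map (fun query => counts.getD query.toList 0)

-- ===== PRECONDITION & SPEC =====
-- A raises KeyError exactly when some dictionary word contains a character outside 'a'..'z'.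
def Pre_letterCombinationsII (queries : List String) (dict : List String) : Prop :=
  (dict.all (fun word => word.toList.all (fun c => 'a' ≤ c && c ≤ 'z'))) = true
instance (queries : List String) (dict : List String) : Decidable (Pre_letterCombinationsII queries dict) := by unfold Pre_letterCombinationsII; infer_instance

def pvWitness_letterCombinationsII : List String × List String := (["2", "", "56"], ["ad", "a"])

def Spec_letterCombinationsII (queries : List String) (dict : List String) (out : List Int) : Prop := out = letterCombinationsII_alt queries dict
instance (queries : List String) (dict : List String) (out : List Int) : Decidable (Spec_letterCombinationsII queries dict out) := by unfold Spec_letterCombinationsII; infer_instance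

-- ===== CLAIM (what is proved, stated in full; the proofs are below) =====
def Claim_equal_letterCombinationsII : Prop := ∀ (queries : List String) (dict : List String), Dom_letterCombinationsII queries dict → Pre_letterCombinationsII queries dict → Spec_letterCombinationsII queries dict (letterCombinationsII queries dict)

-- ===== LEMMAS AND PROOFS =====

-- count the trie's answer for a path
def lookCnt (t : Trie) (q : List Char) : Int :=
  match t.lookup q with
  | some node => node.count
  | none => 0

-- per-word increment seen by a query q (A side): 1 iff q is a non-empty prefix of the digit word
def indA (q w : List Char) : Int := if q ≠ [] ∧ q <+: w then 1 else 0

-- per-word increment with accumulated prefix p (B side)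
def indB (p q w : List Char) : Int :=
  if p <+: q ∧ p ≠ q ∧ q.drop p.length <+: w then 1 else 0

theorem find_set : ∀ (ch : Children) (c c' : Char) (t : Trie),
    (ch.set c t).find c' = if c' = c then some t else ch.find c'
  | .nil, c, c', t => by
      simp [Children.set, Children.find]
  | .cons d t0 rest, c, c', t => by
      by_cases hcd : c = d
      · subst hcd
        by_cases h' : c' = c <;> simp [Children.set, Children.find, h']
      · have ih := find_set rest c c' t
        by_cases h' : c' = d
        · subst h'
          simp [Children.set, Children.find, hcd, Ne.symm hcd]
        · simp [Children.set, Children.find, hcd, h', ih]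

theorem count_add (t : Trie) (w : List Char) : (t.add w).count = t.count := by
  cases t with
  | mk n ch => cases w <;> simp [Trie.add, Trie.count]

theorem lookCnt_cons (n : Int) (ch : Children) (c : Char) (rest : List Char) :
    lookCnt (Trie.mk n ch) (c :: rest) =
      match ch.find c with
      | none => 0
      | some t' => lookCnt t' rest := by
  cases h : ch.find c <;> simp [lookCnt, Trie.lookup, h]

theorem lookCnt_bump (t : Trie) (c : Char) (rest : List Char) :
    lookCnt t.bump (c :: rest) = lookCnt t (c :: rest) := by
  cases t; simp [Trie.bump, lookCnt_cons]

theorem lookCnt_empty (q : List Char) : lookCnt (Trie.mk 0 Children.nil) q = 0 := by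
  cases q <;> simp [lookCnt, Trie.lookup, Trie.count, Children.find]

theorem count_bump (t : Trie) : t.bump.count = t.count + 1 := by
  cases t; rfl

theorem lookCnt_nil (t : Trie) : lookCnt t [] = t.count := rfl

theorem lookCnt_add (q : List Char) : ∀ (t : Trie) (w : List Char),
    lookCnt (t.add w) q = lookCnt t q + indA q w := by
  induction q with
  | nil =>
      intro t w
      simp [lookCnt_nil, count_add, indA]
  | cons c rest ih =>
      intro t w
      cases t with
      | mk n ch =>
        cases w with
        | nil =>
            simp [Trie.add, indA, List.prefix_nil]
        | cons d wr =>
            simp only [Trie.add]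
            rw [lookCnt_cons, find_set, lookCnt_cons]
            by_cases hcd : c = d
            · subst hcd
              rw [if_pos rfl]
              cases rest with
              | nil =>
                  have hind : indA [c] (c :: wr) = 1 := by
                    simp [indA, List.cons_prefix_cons]
                  cases h : ch.find c with
                  | none =>
                      have hc : lookCnt ((Trie.mk 0 Children.nil).bump.add wr) [] = 1 := by
                        rw [lookCnt_nil, count_add, count_bump]; rfl
                      simp [hind, hc]
                  | some t' =>
                      simp [hind, lookCnt_nil, count_add, count_bump]
              | cons r rs =>
                  have hind : indA (c :: r :: rs) (c :: wr) = indA (r :: rs) wr := by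
                    simp [indA, List.cons_prefix_cons]
                  cases h : ch.find c with
                  | none => simp [hind, ih, lookCnt_bump, lookCnt_empty]
                  | some t' => simp [hind, ih, lookCnt_bump]
            · simp only [if_neg hcd]
              have hind : indA (c :: rest) (d :: wr) = 0 := by
                simp [indA, List.cons_prefix_cons, hcd]
              rw [hind, add_zero]

theorem indB_nil_right (p q : List Char) : indB p q [] = 0 := by
  simp only [indB]
  split_ifs with h
  · obtain ⟨⟨t, rfl⟩, h2, h3⟩ := h
    rw [List.drop_left, List.prefix_nil] at h3
    exact absurd (by simp [h3]) h2
  · rfl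

theorem indB_cons (p q w : List Char) (c : Char) :
    indB p q (c :: w) = (if q = p ++ [c] then 1 else 0) + indB (p ++ [c]) q w := by
  by_cases hq : q = p ++ [c]
  · subst hq
    have h1 : indB p (p ++ [c]) (c :: w) = 1 := by
      simp [indB, List.cons_prefix_cons]
    have h2 : indB (p ++ [c]) (p ++ [c]) w = 0 := by
      simp [indB]
    rw [h1, h2, if_pos rfl]; ring
  · rw [if_neg hq, zero_add]
    simp only [indB]
    congr 1
    apply propext
    constructor
    · rintro ⟨⟨t, rfl⟩, h2, h3⟩
      rw [List.drop_left] at h3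
      cases t with
      | nil => exact absurd (by simp) h2
      | cons t0 ts =>
          rw [List.cons_prefix_cons] at h3
          obtain ⟨rfl, hts⟩ := h3
          refine ⟨⟨ts, by simp⟩, ?_, ?_⟩
          · intro he
            apply hq
            simpa using he.symm
          · have : (p ++ [t0] ++ ts).drop (p ++ [t0]).length = ts := List.drop_left
            simpa [List.append_assoc] using this ▸ hts
    · rintro ⟨⟨t, rfl⟩, h2, h3⟩
      rw [List.drop_left] at h3
      refine ⟨⟨c :: t, by simp⟩, ?_, ?_⟩
      · intro he
        have : c :: t = [] := by
          have := he
          simp [List.append_assoc] at this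
        simp at this
      · have hd : ((p ++ [c]) ++ t).drop p.length = c :: t := by
          rw [List.append_assoc]
          exact List.drop_left
        rw [List.append_assoc] at hd ⊢
        rw [hd, List.cons_prefix_cons]
        exact ⟨rfl, h3⟩

theorem getD_bInner (q : List Char) : ∀ (w p : List Char) (d : PySem.Dict (List Char) Int),
    ((bInner w (p, d)).2).getD q 0 = d.getD q 0 + indB p q w := by
  intro w
  induction w with
  | nil =>
      intro p d
      simp [bInner, indB_nil_right]
  | cons c wr ih =>
      intro p d
      have hstep : bInner (c :: wr) (p, d)
          = bInner wr (p ++ [c], d.insert (p ++ [c]) (d.getD (p ++ [c]) 0 + 1)) := rfl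
      rw [hstep, ih, PySem.Dict.getD_insert, indB_cons]
      split_ifs with h
      · subst h
        ring
      · ring

theorem indB_nil (q w : List Char) : indB [] q w = indA q w := by
  simp [indA, indB, List.nil_prefix]

theorem fold_agree (ws : List String) : ∀ (t : Trie) (d : PySem.Dict (List Char) Int),
    (∀ q, lookCnt t q = d.getD q 0) →
    ∀ q, lookCnt (ws.foldl (fun r word => r.add (digitWordOf word)) t) q
        = (ws.foldl bWordStep d).getD q 0 := by
  induction ws with
  | nil => intro t d h q; simpa using h q
  | cons w ws ih =>
      intro t d h q
      simp only [List.foldl_cons]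
      apply ih
      intro q'
      rw [lookCnt_add, bWordStep, getD_bInner, h q', indB_nil]

-- ===== VERDICT (by name: the statement is the Claim_ definition above) =====
theorem letterCombinationsII_spec : Claim_equal_letterCombinationsII := by
  intro queries dict _ _
  unfold Spec_letterCombinationsII letterCombinationsII letterCombinationsII_alt
  apply List.map_congr_left
  intro q _
  have h := fold_agree dict (Trie.mk 0 Children.nil) PySem.Dict.empty
    (fun q => by simp [lookCnt_empty]) q.toList
  simpa [lookCnt] using h
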